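-- pv_equiv track=rewrite | github.com/RochaGabriell/MiniProjects | Password_Strength/main.py | getPasswordStrength
-- ===== SOURCE A (Python) =====
-- def getPasswordStrength(passwords, common_words):
--     strengths = []
--     for password in passwords:
--         if len(password) < 6:
--             strengths.append("weak")
--         # isdigit(): Retorna True se todos os caracteres na string são dígitos e existe pelo menos um caractere, False caso contrário. Ou seja, se for digitado “123”, isdigit() retorna True , mas se digitar “abc” ou “a23”, retorna False . É uma forma de verificar se a string só contém dígitos.
--         # isalpha(): caractere é passado para a função. Internamente, o caractere é convertido em seu valor ASCII para a verificação. Retorna: 1 caso seja uma letra do alfabeto maiúscula, 2 caso seja minúscula, 0 caso não esteja no alfabeto.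
--         elif password.isdigit() or password.isalpha() and (password.isupper() or password.islower()):
--             strengths.append("weak")
--         else:
--             weak = False
--             for word in common_words:
--                 if word in password or word[::-1] in password:
--                     weak = True
--                     break
--             if weak:
--                 strengths.append("weak")
--             else:
--                 strengths.append("strong")
--     return strengths
-- ===== SOURCE B (Python) =====
-- def getPasswordStrength(passwords, common_words):
--     # Dictionary-of-needles approach: build the set of banned substrings (each
--     # common word and its reversal) and the set of their lengths once; a password
--     # is then checked by enumerating its own substrings of those lengths and
--     # looking each up in the set.  Character-class tests are done with one
--     # counting pass instead of the isdigit/isalpha/isupper/islower built-ins.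
--     needles = {w for word in common_words for w in (word, word[::-1])}
--     lens = {len(nd) for nd in needles}
--
--     def weak(p):
--         digits = alphas = uppers = lowers = 0
--         for c in p:
--             if c.isdigit():
--                 digits += 1
--             if c.isalpha():
--                 alphas += 1
--             if c.isupper():
--                 uppers += 1
--             if c.islower():
--                 lowers += 1
--         n = len(p)
--         if n < 6:
--             return True
--         if digits == n:  # here n >= 6 > 0: all characters are digits
--             return True
--         if alphas == n and (uppers == 0 or lowers == 0):
--             return True
--         return any(p[i:i + L] in needles for L in lens for i in range(n - L + 1))
--
--     return ["weak" if weak(p) else "strong" for p in passwords]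
-- ===== Notes on version B (the rewrite author's own statement) =====
-- stated objective: alternative
-- what changed: B inverts the search: it builds the set of banned substrings (each common word and its reversal) and the set of their lengths once, then classifies each password by enumerating the password's own substrings of those lengths and looking them up in the set, and replaces the isdigit/isalpha/isupper/islower built-ins by a single counting pass over the characters.
import Mathlib
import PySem

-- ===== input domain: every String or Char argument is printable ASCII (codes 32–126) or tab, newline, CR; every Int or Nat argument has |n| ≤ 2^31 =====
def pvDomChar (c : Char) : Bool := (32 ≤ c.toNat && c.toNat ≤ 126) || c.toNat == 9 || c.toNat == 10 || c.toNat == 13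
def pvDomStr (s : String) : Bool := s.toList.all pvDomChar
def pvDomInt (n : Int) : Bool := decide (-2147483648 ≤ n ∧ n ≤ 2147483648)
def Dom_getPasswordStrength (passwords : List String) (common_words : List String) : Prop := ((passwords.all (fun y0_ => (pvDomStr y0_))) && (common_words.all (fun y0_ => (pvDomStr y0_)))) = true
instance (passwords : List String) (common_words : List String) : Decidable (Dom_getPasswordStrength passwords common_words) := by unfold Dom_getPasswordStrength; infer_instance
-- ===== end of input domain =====

-- B replaces A's per-word containment scans by a set of banned substrings looked up
-- against the password's own substrings, and the isdigit/isalpha/isupper/islower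
-- built-ins by one counting pass over the characters. Objective: alternative.

-- ===== PORT A =====
-- str.isupper(): at least one cased char and no lowercase cased char. Exact on the
-- printable-ASCII domain, where the cased characters are exactly the letters.
def pvStrIsupper (s : String) : Bool :=
  s.toList.any PySem.Chars.isupper && s.toList.all (fun c => !PySem.Chars.islower c)
-- str.islower(), symmetrically (exact on the printable-ASCII domain).
def pvStrIslower (s : String) : Bool :=
  s.toList.any PySem.Chars.islower && s.toList.all (fun c => !PySem.Chars.isupper c)
-- w[::-1]: reversal (exact: PySem.Str.slice?_none_none_neg_one).
def pvRev (w : String) : String := String.ofList w.toList.reverse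

-- the inner 'for word in common_words: … break' loop, returning the flag `weak`
def pvWordLoop (password : String) : List String → Bool
  | [] => false
  | word :: rest =>
    if PySem.Str.isIn word password || PySem.Str.isIn (pvRev word) password then true
    else pvWordLoop password rest

def getPasswordStrength (passwords : List String) (common_words : List String) : List String :=
  passwords.foldl (fun strengths password =>
    if PySem.Str.len password < 6 then strengths ++ ["weak"]
    else if PySem.Str.strIsdigit password ||
            (PySem.Str.strIsalpha password && (pvStrIsupper password || pvStrIslower password)) then
      strengths ++ ["weak"]
    else
      if pvWordLoop password common_words then strengths ++ ["weak"]
      else strengths ++ ["strong"]) []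

-- ===== PORT B =====
-- needles = {w for word in common_words for w in (word, word[::-1])}
def pvNeedles (common_words : List String) : PySem.Set String :=
  PySem.Set.ofList (common_words.flatMap (fun word => [word, pvRev word]))

-- lens = {len(nd) for nd in needles}
def pvLens (needles : PySem.Set String) : PySem.Set Int :=
  PySem.Set.ofList (needles.map PySem.Str.len)

-- the counting loop of weak(): (digits, alphas, uppers, lowers)
def pvCensus : List Char → Nat × Nat × Nat × Nat → Nat × Nat × Nat × Nat
  | [], acc => acc
  | c :: rest, (d, a, u, l) =>
    pvCensus rest
      (d + (if PySem.Chars.isdigit c then 1 else 0),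
       a + (if PySem.Chars.isalpha c then 1 else 0),
       u + (if PySem.Chars.isupper c then 1 else 0),
       l + (if PySem.Chars.islower c then 1 else 0))

-- any(p[i:i+L] in needles for L in lens for i in range(n - L + 1))
def pvHasNeedle (needles : PySem.Set String) (lens : PySem.Set Int) (p : String) : Bool :=
  lens.any (fun L =>
    (PySem.List.pyRange 0 (PySem.Str.len p - L + 1)).any (fun i =>
      PySem.Set.contains needles (PySem.Str.slice p (some i) (some (i + L)))))

def pvWeak (needles : PySem.Set String) (lens : PySem.Set Int) (p : String) : Bool :=
  let census := pvCensus p.toList (0, 0, 0, 0)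
  let n := p.toList.length
  if n < 6 then true
  else if census.1 = n then true
  else if census.2.1 = n && (census.2.2.1 = 0 || census.2.2.2 = 0) then true
  else pvHasNeedle needles lens p

def getPasswordStrength_alt (passwords : List String) (common_words : List String) : List String :=
  let needles := pvNeedles common_words
  let lens := pvLens needles
  passwords.map (fun p => if pvWeak needles lens p then "weak" else "strong")

-- ===== PRECONDITION & SPEC =====
def Spec_getPasswordStrength (passwords : List String) (common_words : List String) (out : List String) : Prop := out = getPasswordStrength_alt passwords common_words
instance (passwords : List String) (common_words : List String) (out : List String) : Decidable (Spec_getPasswordStrength passwords common_words out) := by unfold Spec_getPasswordStrength; infer_instance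

-- ===== CLAIM (what is proved, stated in full; the proofs are below) =====
def Claim_equal_getPasswordStrength : Prop := ∀ (passwords : List String) (common_words : List String), Dom_getPasswordStrength passwords common_words → Spec_getPasswordStrength passwords common_words (getPasswordStrength passwords common_words)

-- ===== LEMMAS AND PROOFS =====

-- the counting loop computes the four character-class counts
theorem pvCensus_eq (cs : List Char) (d a u l : Nat) :
    pvCensus cs (d, a, u, l) =
      (d + cs.countP PySem.Chars.isdigit, a + cs.countP PySem.Chars.isalpha,
       u + cs.countP PySem.Chars.isupper, l + cs.countP PySem.Chars.islower) := by
  induction cs generalizing d a u l with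
  | nil => simp [pvCensus]
  | cons c rest ih =>
    simp only [pvCensus, ih, List.countP_cons, Prod.mk.injEq]
    refine ⟨by omega, by omega, by omega, by omega⟩

-- Bool bridges: any/all against countP
theorem pv_any_eq (q : Char → Bool) (cs : List Char) :
    cs.any q = decide (0 < cs.countP q) := by
  rw [Bool.eq_iff_iff]; simp [List.any_eq_true, List.countP_pos_iff]

theorem pv_none_eq (q : Char → Bool) (cs : List Char) :
    cs.all (fun c => !q c) = decide (cs.countP q = 0) := by
  rw [Bool.eq_iff_iff]; simp [List.all_eq_true, List.countP_eq_zero]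

theorem pv_all_eq (q : Char → Bool) (cs : List Char) :
    cs.all q = decide (cs.countP q = cs.length) := by
  rw [Bool.eq_iff_iff]; simp [List.all_eq_true, List.countP_eq_length]

-- no character is both an uppercase and a lowercase letter
theorem pv_not_upper_and_lower (c : Char) :
    ¬ (PySem.Chars.isupper c = true ∧ PySem.Chars.islower c = true) := by
  simp only [PySem.Chars.isupper, PySem.Chars.islower, Bool.and_eq_true, decide_eq_true_eq]
  rintro ⟨⟨-, h1⟩, ⟨h2, -⟩⟩
  exact absurd (le_trans h2 h1) (by decide)

-- letters split into uppercase and lowercase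
theorem pv_countP_alpha (cs : List Char) :
    cs.countP PySem.Chars.isalpha =
      cs.countP PySem.Chars.isupper + cs.countP PySem.Chars.islower := by
  induction cs with
  | nil => simp
  | cons c rest ih =>
    have := pv_not_upper_and_lower c
    simp only [List.countP_cons, ih, PySem.Chars.isalpha, Bool.or_eq_true]
    by_cases hu : PySem.Chars.isupper c = true <;> by_cases hl : PySem.Chars.islower c = true <;>
      simp [hu, hl] at this ⊢ <;> omega

-- B's substring-set lookup ↔ some needle is an infix of the password
theorem pvHasNeedle_iff (ws : List String) (p : String) :
    pvHasNeedle (pvNeedles ws) (pvLens (pvNeedles ws)) p = true ↔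
      ∃ nd ∈ pvNeedles ws, nd.toList <:+: p.toList := by
  constructor
  · rintro h
    simp only [pvHasNeedle, List.any_eq_true] at h
    obtain ⟨L, hL, i, hi, hc⟩ := h
    rw [PySem.List.mem_pyRange_one] at hi
    simp only [pvLens, PySem.Set.mem_ofList, List.mem_map] at hL
    obtain ⟨nd0, -, rfl⟩ := hL
    obtain ⟨j, rfl⟩ : ∃ j : Nat, (j : Int) = i := ⟨i.toNat, Int.toNat_of_nonneg hi.1⟩
    refine ⟨_, List.contains_iff_mem.mp hc, ?_⟩
    rw [PySem.Str.toList_slice, PySem.Chars.slice_eq_listSlice, PySem.Str.len_eq,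
      PySem.List.slice_natCast_add]
    exact (List.take_prefix _ _).isInfix.trans (List.drop_suffix _ _).isInfix
  · rintro ⟨nd, hnd, hinf⟩
    simp only [pvHasNeedle, List.any_eq_true]
    refine ⟨PySem.Str.len nd, ?_, ?_⟩
    · simp only [pvLens, PySem.Set.mem_ofList, List.mem_map]
      exact ⟨nd, hnd, rfl⟩
    · obtain ⟨j0, hpre⟩ := (PySem.Chars.exists_prefix_drop_iff_isIn nd.toList p.toList).mpr
        ((PySem.Chars.isIn_iff_infix _ _).mpr hinf)
      have hlen : nd.toList.length ≤ (p.toList.drop j0).length := hpre.length_le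
      rw [List.length_drop] at hlen
      have hj0 : j0 + nd.toList.length ≤ p.toList.length ∨ p.toList.length ≤ j0 := by omega
      obtain ⟨j, hj, hpre⟩ : ∃ j : Nat, j + nd.toList.length ≤ p.toList.length ∧
          nd.toList <+: p.toList.drop j := by
        rcases hj0 with h | h
        · exact ⟨j0, h, hpre⟩
        · -- j0 past the end of the password: nd must be empty, restart at 0
          have hnil : nd.toList = [] := List.length_eq_zero_iff.mp (by omega)
          exact ⟨0, by omega, by simp [hnil]⟩
      refine ⟨(j : Int), ?_, ?_⟩
      · rw [PySem.List.mem_pyRange_one, PySem.Str.len_eq p, PySem.Str.len_eq nd]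
        omega
      · apply List.contains_iff_mem.mpr
        have heq : PySem.Str.slice p (some (j : Int))
            (some ((j : Int) + PySem.Str.len nd)) = nd := by
          apply String.toList_inj.mp
          rw [PySem.Str.toList_slice, PySem.Chars.slice_eq_listSlice, PySem.Str.len_eq,
            PySem.List.slice_natCast_add]
          exact (List.prefix_iff_eq_take.mp hpre).symm
        rw [heq]; exact hnd

-- A's break-flag word loop ↔ some needle is an infix of the password
theorem pvWordLoop_iff (ws : List String) (p : String) :
    pvWordLoop p ws = true ↔ ∃ nd ∈ pvNeedles ws, nd.toList <:+: p.toList := by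
  simp only [pvNeedles, PySem.Set.mem_ofList, List.mem_flatMap]
  induction ws with
  | nil => simp [pvWordLoop]
  | cons w rest ih =>
    simp only [pvWordLoop]
    split
    · next h =>
      simp only [true_iff]
      rcases Bool.or_eq_true _ _ |>.mp h with h | h
      · exact ⟨w, ⟨w, by simp, by simp⟩, (PySem.Str.isIn_iff_infix _ _).mp h⟩
      · exact ⟨pvRev w, ⟨w, by simp, by simp⟩, (PySem.Str.isIn_iff_infix _ _).mp h⟩
    · next h =>
      rw [ih]
      constructor
      · rintro ⟨nd, ⟨w', hw', hnd⟩, hinf⟩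
        exact ⟨nd, ⟨w', List.mem_cons_of_mem _ hw', hnd⟩, hinf⟩
      · rintro ⟨nd, ⟨w', hw', hnd⟩, hinf⟩
        rcases List.mem_cons.mp hw' with rfl | hw'
        · exfalso
          simp only [Bool.or_eq_true, not_or] at h
          simp only [List.mem_cons, List.not_mem_nil, or_false] at hnd
          rcases hnd with rfl | rfl
          · exact h.1 ((PySem.Str.isIn_iff_infix _ _).mpr hinf)
          · exact h.2 ((PySem.Str.isIn_iff_infix _ _).mpr hinf)
        · exact ⟨nd, ⟨w', hw', hnd⟩, hinf⟩

-- per-password agreement of the two classifications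
theorem pv_classify_eq (ws : List String) (p : String) :
    (if PySem.Str.len p < 6 then ["weak"]
     else if PySem.Str.strIsdigit p ||
             (PySem.Str.strIsalpha p && (pvStrIsupper p || pvStrIslower p)) then ["weak"]
     else if pvWordLoop p ws then ["weak"] else ["strong"])
      = [if pvWeak (pvNeedles ws) (pvLens (pvNeedles ws)) p then "weak" else "strong"] := by
  unfold pvWeak
  rw [pvCensus_eq]
  simp only [Nat.zero_add]
  set cs := p.toList with hcs
  have hlen : PySem.Str.len p = (cs.length : Int) := PySem.Str.len_eq p
  by_cases h6 : cs.length < 6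
  · have h6' : PySem.Str.len p < 6 := by rw [hlen]; exact_mod_cast h6
    rw [if_pos h6', if_pos h6]; rfl
  · have h6' : ¬ PySem.Str.len p < 6 := by rw [hlen]; exact_mod_cast h6
    rw [if_neg h6', if_neg h6]
    have hne : cs ≠ [] := by intro h; rw [h] at h6; simp at h6
    have hdig : PySem.Str.strIsdigit p =
        decide (cs.countP PySem.Chars.isdigit = cs.length) := by
      rw [PySem.Str.strIsdigit_eq, ← hcs]
      simp [PySem.Chars.strIsdigit, hne, pv_all_eq]
    have halpha : (PySem.Str.strIsalpha p && (pvStrIsupper p || pvStrIslower p))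
        = (decide (cs.countP PySem.Chars.isalpha = cs.length) &&
            (decide (cs.countP PySem.Chars.isupper = 0) ||
             decide (cs.countP PySem.Chars.islower = 0))) := by
      rw [PySem.Str.strIsalpha_eq, ← hcs]
      have h1 : PySem.Chars.strIsalpha cs =
          decide (cs.countP PySem.Chars.isalpha = cs.length) := by
        simp [PySem.Chars.strIsalpha, hne, pv_all_eq]
      have hup : pvStrIsupper p = (decide (0 < cs.countP PySem.Chars.isupper) &&
          decide (cs.countP PySem.Chars.islower = 0)) := by
        unfold pvStrIsupper; rw [← hcs, pv_any_eq, pv_none_eq]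
      have hlo : pvStrIslower p = (decide (0 < cs.countP PySem.Chars.islower) &&
          decide (cs.countP PySem.Chars.isupper = 0)) := by
        unfold pvStrIslower; rw [← hcs, pv_any_eq, pv_none_eq]
      rw [h1, hup, hlo]
      by_cases han : cs.countP PySem.Chars.isalpha = cs.length
      · have hsum := pv_countP_alpha cs
        have hn0 : 0 < cs.length := by omega
        by_cases hu : cs.countP PySem.Chars.isupper = 0 <;>
          by_cases hl : cs.countP PySem.Chars.islower = 0
        · exfalso; omega
        · have : 0 < cs.countP PySem.Chars.islower := by omega
          simp [han, hu, hl, this]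
        · have : 0 < cs.countP PySem.Chars.isupper := by omega
          simp [han, hu, hl, this]
        · simp [han, hu, hl]
      · simp [han]
    rw [hdig, halpha]
    have hword : pvHasNeedle (pvNeedles ws) (pvLens (pvNeedles ws)) p = pvWordLoop p ws := by
      rw [Bool.eq_iff_iff, pvHasNeedle_iff, pvWordLoop_iff]
    rw [hword]
    by_cases hd : cs.countP PySem.Chars.isdigit = cs.length <;>
      cases hX : (decide (cs.countP PySem.Chars.isalpha = cs.length) &&
          (decide (cs.countP PySem.Chars.isupper = 0) ||
           decide (cs.countP PySem.Chars.islower = 0))) <;>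
        cases hw2 : pvWordLoop p ws <;> simp [hd, hX, hw2]


theorem getPasswordStrength_spec : Claim_equal_getPasswordStrength := by
  intro passwords common_words _
  unfold Spec_getPasswordStrength getPasswordStrength getPasswordStrength_alt
  have hbody : (fun (strengths : List String) (password : String) =>
      if PySem.Str.len password < 6 then strengths ++ ["weak"]
      else if PySem.Str.strIsdigit password ||
              (PySem.Str.strIsalpha password && (pvStrIsupper password || pvStrIslower password)) then
        strengths ++ ["weak"]
      else
        if pvWordLoop password common_words then strengths ++ ["weak"]
        else strengths ++ ["strong"])
      = (fun strengths password =>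
          strengths ++ [if pvWeak (pvNeedles common_words) (pvLens (pvNeedles common_words))
              password then "weak" else "strong"]) := by
    funext strengths password
    have := pv_classify_eq common_words password
    split_ifs at this ⊢ <;> simp_all
  rw [hbody, PySem.List.foldl_append_singleton_eq_map, List.nil_append]
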